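-- pv_equiv track=rewrite | github.com/hkg109/plant | python/[수1] 암호화.py | sentence_to_numbers3
-- ===== SOURCE A (Python) =====
-- def letter_to_number(letter):
--     # 알파벳을 숫자로 매핑하는 사전
--     alphabet = 'abcdefghijklmnopqrstuvwxyz'
--     return alphabet.index(letter) + 1
--
-- def sentence_to_numbers3(sentence):
--     number_pairs = []
--     i = 0
--     sentence = sentence.replace(" ","")
--     while i < len(sentence):
--         if i + 1 < len(sentence):
--             pair = sentence[i:i+2]
--             i += 2
--         else:
--             pair = sentence[i]
--             i += 1
--
--         number_pair = ''
--         for letter in pair: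
--             if letter.isalpha():  # 알파벳만 변환
--                 number_pair += "{:02d}".format(letter_to_number(letter.lower()))
--         number_pairs.append(number_pair)
--
--     return ' '.join(number_pairs)
-- ===== SOURCE B (Python) =====
-- def letter_to_number(letter):
--     alphabet = 'abcdefghijklmnopqrstuvwxyz'
--     return alphabet.index(letter) + 1
--
--
-- def sentence_to_numbers3(sentence):
--     # phase 1: per-character codes ('' for non-alpha), phase 2: chunk into pairs
--     s = sentence.replace(" ", "")
--     codes = ["{:02d}".format(letter_to_number(c.lower())) if c.isalpha() else '' for c in s]
--     tokens = [''.join(codes[i:i + 2]) for i in range(0, len(codes), 2)]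
--     return ' '.join(tokens)
-- ===== Notes on version B (the rewrite author's own statement) =====
-- stated objective: simpler
-- what changed: A interleaves conversion and pairing in one index-driven while loop with slicing and an inner for; B first maps every despaced character to its two-digit code (or '' for non-alpha), then chunks that code list into pairs and joins.
import Mathlib
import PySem

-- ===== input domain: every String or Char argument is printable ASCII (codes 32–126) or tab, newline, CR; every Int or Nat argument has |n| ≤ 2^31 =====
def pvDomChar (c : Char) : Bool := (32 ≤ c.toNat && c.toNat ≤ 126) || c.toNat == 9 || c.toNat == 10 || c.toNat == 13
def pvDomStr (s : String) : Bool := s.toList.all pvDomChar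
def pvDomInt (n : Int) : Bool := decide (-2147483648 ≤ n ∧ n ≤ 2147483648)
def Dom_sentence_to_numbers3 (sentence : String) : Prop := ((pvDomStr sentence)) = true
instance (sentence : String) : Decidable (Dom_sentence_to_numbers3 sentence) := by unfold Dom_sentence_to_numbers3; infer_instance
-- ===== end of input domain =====

-- B separates A's interleaved while-loop into two phases (per-char code map, then pair chunking); objective: simpler decomposition, same cost.

-- ===== PORT A =====
-- alphabet.index(letter) + 1; .index raises ValueError only for letters outside a-z,
-- unreachable here: every call is guarded by isalpha and lowered, ASCII on Dom.
def letterToNumber (letter : Char) : Int :=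
  let alphabet := "abcdefghijklmnopqrstuvwxyz"
  ((PySem.List.index? alphabet.toList letter).getD 0 : Int) + 1

-- "{:02d}".format(n) for the nonnegative n produced here = str(n) zero-padded to width 2
def fmt02 (n : Int) : List Char := PySem.Chars.zfill (PySem.Int.toChars n) 2

-- the body of A's for-loop over `pair`
def pairFoldA (pair : List Char) : List Char :=
  pair.foldl (fun np letter =>
    if PySem.Chars.isalpha letter then np ++ fmt02 (letterToNumber (PySem.Chars.lowerChar letter)) else np) []

-- A's while loop over index i, accumulating number_pairs
def loopA (cs : List Char) (i : Nat) (acc : List (List Char)) : List (List Char) :=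
  if i < cs.length then
    if i + 1 < cs.length then
      loopA cs (i + 2) (acc ++ [pairFoldA (PySem.List.slice cs (some (i : Int)) (some ((i : Int) + 2)))])
    else
      loopA cs (i + 1) (acc ++ [pairFoldA [PySem.List.pyGetD cs (i : Int) ' ']])
  else acc
termination_by cs.length - i

def sentence_to_numbers3 (sentence : String) : String :=
  String.ofList (PySem.Chars.join [' '] (loopA (PySem.Str.replace sentence " " "").toList 0 []))

-- ===== PORT B =====
-- two-digit code for one character, '' for non-alpha
def codeOf (c : Char) : List Char :=
  if PySem.Chars.isalpha c then
    PySem.Chars.zfill (PySem.Int.toChars (((PySem.List.index? "abcdefghijklmnopqrstuvwxyz".toList (PySem.Chars.lowerChar c)).getD 0 : Int) + 1)) 2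
  else []

-- B's comprehension: [''.join(codes[i:i+2]) for i in range(0, len(codes), 2)]
def tokensB (codes : List (List Char)) : List (List Char) :=
  (PySem.List.pyRange 0 codes.length 2).map
    (fun i => PySem.Chars.join [] (PySem.List.slice codes (some i) (some (i + 2))))

def sentence_to_numbers3_alt (sentence : String) : String :=
  String.ofList (PySem.Chars.join [' '] (tokensB ((PySem.Str.replace sentence " " "").toList.map codeOf)))

-- ===== PRECONDITION & SPEC =====
def Spec_sentence_to_numbers3 (sentence : String) (out : String) : Prop := out = sentence_to_numbers3_alt sentence
instance (sentence : String) (out : String) : Decidable (Spec_sentence_to_numbers3 sentence out) := by unfold Spec_sentence_to_numbers3; infer_instance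

-- ===== CLAIM (what is proved, stated in full; the proofs are below) =====
def Claim_equal_sentence_to_numbers3 : Prop := ∀ (sentence : String), Dom_sentence_to_numbers3 sentence → Spec_sentence_to_numbers3 sentence (sentence_to_numbers3 sentence)

-- ===== LEMMAS AND PROOFS =====

theorem pyRange_two (n : Nat) :
    PySem.List.pyRange 0 (n : Int) 2 = (List.range ((n + 1) / 2)).map (fun k => ((2 * k : Nat) : Int)) := by
  unfold PySem.List.pyRange
  norm_num
  have hc : (if 0 < n then (((n : Int) + 2 - 1) / 2).toNat else 0) = (n + 1) / 2 := by
    split_ifs <;> omega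
  rw [hc]

theorem tokensB_aux (xs : List (List Char)) :
    tokensB xs = (List.range ((xs.length + 1) / 2)).map
      (fun k => PySem.Chars.join [] ((xs.drop (2 * k)).take 2)) := by
  unfold tokensB
  rw [pyRange_two, List.map_map]
  apply List.map_congr_left
  intro k _
  simp only [Function.comp]
  rw [show ((2 * k : Nat) : Int) + 2 = ((2 * k + 2 : Nat) : Int) by push_cast; ring,
      PySem.List.slice_natCast, show 2 * k + 2 - 2 * k = 2 by omega]

theorem tokensB_nil : tokensB [] = [] := by
  rw [tokensB_aux]
  simp

theorem tokensB_single (x : List Char) : tokensB [x] = [x] := by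
  rw [tokensB_aux]
  simp [PySem.Chars.join_singleton]

theorem tokensB_cons2 (x y : List Char) (xs : List (List Char)) :
    tokensB (x :: y :: xs) = (x ++ y) :: tokensB xs := by
  rw [tokensB_aux, tokensB_aux]
  have hl : ((x :: y :: xs).length + 1) / 2 = (xs.length + 1) / 2 + 1 := by
    simp; omega
  rw [hl, List.range_succ_eq_map, List.map_cons, List.map_map]
  have hhead : PySem.Chars.join [] (List.take 2 (List.drop (2 * 0) (x :: y :: xs))) = x ++ y := by
    simp [PySem.Chars.join_cons_cons, PySem.Chars.join_singleton]
  rw [hhead]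
  congr 1

-- reference shape both programs compute: pair recursion over the despaced characters
def pairsR : List Char → List (List Char)
  | [] => []
  | [c] => [codeOf c]
  | c1 :: c2 :: rest => (codeOf c1 ++ codeOf c2) :: pairsR rest

theorem codeOf_eq (c : Char) :
    codeOf c = if PySem.Chars.isalpha c then fmt02 (letterToNumber (PySem.Chars.lowerChar c)) else [] := by
  simp [codeOf, fmt02, letterToNumber]

theorem pairFoldA_pair (a b : Char) : pairFoldA [a, b] = codeOf a ++ codeOf b := by
  simp only [pairFoldA, codeOf_eq, List.foldl]
  by_cases ha : PySem.Chars.isalpha a <;> by_cases hb : PySem.Chars.isalpha b <;> simp [ha, hb]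

theorem pairFoldA_single (a : Char) : pairFoldA [a] = codeOf a := by
  simp only [pairFoldA, codeOf_eq, List.foldl]
  by_cases ha : PySem.Chars.isalpha a <;> simp [ha]

theorem loopA_eq (cs : List Char) (n i : Nat) (acc : List (List Char)) (hn : cs.length - i ≤ n) :
    loopA cs i acc = acc ++ pairsR (cs.drop i) := by
  induction n generalizing i acc with
  | zero =>
      have h : ¬ i < cs.length := by omega
      have hd : cs.drop i = [] := List.drop_eq_nil_of_le (by omega)
      rw [loopA]
      simp [h, hd, pairsR]
  | succ n ih =>
      rw [loopA]
      by_cases h : i < cs.length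
      · have hdrop : cs.drop i = cs[i] :: cs.drop (i + 1) := List.drop_eq_getElem_cons h
        by_cases h2 : i + 1 < cs.length
        · have hdrop2 : cs.drop (i + 1) = cs[i + 1] :: cs.drop (i + 2) :=
            List.drop_eq_getElem_cons h2
          have hslice : PySem.List.slice cs (some (i : Int)) (some ((i : Int) + 2))
              = [cs[i], cs[i + 1]] := by
            have hc : ((i : Int) + 2) = ((i + 2 : Nat) : Int) := by push_cast; ring
            rw [hc, PySem.List.slice_natCast, show i + 2 - i = 2 by omega, hdrop, hdrop2]
            rfl
          simp only [h, h2, if_true, hslice]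
          rw [ih (i + 2) _ (by omega), hdrop, hdrop2, pairFoldA_pair]
          simp [pairsR]
        · have hdrop2 : cs.drop (i + 1) = [] := List.drop_eq_nil_of_le (by omega)
          have hget : PySem.List.pyGetD cs (i : Int) ' ' = cs[i] := by
            rw [PySem.List.pyGetD_natCast]
            simp [h]
          simp only [h, h2, if_true, if_false, hget]
          rw [ih (i + 1) _ (by omega), hdrop, hdrop2, pairFoldA_single]
          simp [pairsR]
      · have hd : cs.drop i = [] := List.drop_eq_nil_of_le (by omega)
        simp [h, hd, pairsR]

theorem tokensB_map (cs : List Char) : tokensB (cs.map codeOf) = pairsR cs := by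
  induction cs using pairsR.induct with
  | case1 => simpa using tokensB_nil
  | case2 c => simpa using tokensB_single (codeOf c)
  | case3 c1 c2 rest ih =>
      rw [show ((c1 :: c2 :: rest).map codeOf) = codeOf c1 :: codeOf c2 :: rest.map codeOf from rfl,
          tokensB_cons2, ih, pairsR]

-- ===== VERDICT (by name: the statement is the Claim_ definition above) =====
theorem sentence_to_numbers3_spec : Claim_equal_sentence_to_numbers3 := by
  intro sentence _
  unfold Spec_sentence_to_numbers3 sentence_to_numbers3 sentence_to_numbers3_alt
  rw [loopA_eq ((PySem.Str.replace sentence " " "").toList) ((PySem.Str.replace sentence " " "").toList.length) 0 [] (by omega)]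
  rw [tokensB_map]
  simp
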